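-- pv_equiv track=rewrite | github.com/ieb/timetables | python/lib/util.py | hide_commas
-- ===== SOURCE A (Python) =====
-- def hide_commas(data):
--     ranges = data.split(",")
--     out = ""
--     was_range = False
--     first = True
--     for r in ranges:
--         is_range = ('-' in r)
--         if (is_range or was_range) and not first:
--             out += ","
--         out += r
--         was_range = is_range
--         first = False
--     return out
-- ===== SOURCE B (Python) =====
-- def hide_commas(data):
--     n = len(data)
--     # pass 1 (backward): dash_ahead[i] == "a '-' occurs in data[i:] before the next ','"
--     dash_ahead = [False] * (n + 1)
--     for i in range(n - 1, -1, -1):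
--         c = data[i]
--         dash_ahead[i] = c == '-' or (c != ',' and dash_ahead[i + 1])
--     # pass 2 (forward): keep a ',' iff a '-' was seen since the previous ',' or lies before the next ','
--     out = []
--     dash_behind = False
--     for c, ahead in zip(data, dash_ahead[1:]):
--         if c == ',':
--             if dash_behind or ahead:
--                 out.append(c)
--             dash_behind = False
--         else:
--             out.append(c)
--             dash_behind = dash_behind or c == '-'
--     return ''.join(out)
-- ===== Notes on version B (the rewrite author's own statement) =====
-- stated objective: alternative
-- what changed: Instead of splitting on ',' and rejoining tokens with carried flags, B never splits: it filters the characters in place, deleting each ',' unless a '-' lies in an adjacent token, using a precomputed backward suffix pass (dash-before-next-comma flags) plus one forward pass.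
import Mathlib
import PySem

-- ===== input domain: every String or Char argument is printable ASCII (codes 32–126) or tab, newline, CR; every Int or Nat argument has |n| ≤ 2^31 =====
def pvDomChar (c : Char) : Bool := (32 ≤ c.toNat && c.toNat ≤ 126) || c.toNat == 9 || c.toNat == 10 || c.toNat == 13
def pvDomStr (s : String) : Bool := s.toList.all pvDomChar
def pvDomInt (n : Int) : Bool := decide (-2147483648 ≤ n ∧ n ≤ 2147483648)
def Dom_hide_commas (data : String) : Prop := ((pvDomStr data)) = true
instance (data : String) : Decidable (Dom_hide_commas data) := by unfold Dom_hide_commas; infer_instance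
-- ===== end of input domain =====

-- B drops the split/rejoin entirely: it filters the characters in place, deleting each
-- ',' whose neighbouring tokens are dash-free, via a backward suffix pass plus a forward
-- pass (alternative algorithm, same cost).

-- ===== PORT A =====
-- A's loop body on state (out, was_range, first)
def hide_commas_body (st : List Char × Bool × Bool) (r : List Char) : List Char × Bool × Bool :=
  let out := st.1
  let was_range := st.2.1
  let first := st.2.2
  let is_range := PySem.Chars.isIn ['-'] r
  let out := if (is_range || was_range) && !first then out ++ [','] else out
  (out ++ r, is_range, false)

def hide_commas (data : String) : String :=
  let ranges := PySem.Chars.splitOn data.toList [',']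
  let st := ranges.foldl hide_commas_body ([], false, true)
  String.ofList st.1

-- ===== PORT B =====
-- backward pass: hc_ahead cs = Python's dash_ahead list (index i ↔ suffix cs.drop i);
-- entry i is "a '-' occurs in the suffix before the next ','"
def hc_ahead : List Char → List Bool
  | [] => [false]
  | c :: rest =>
    let t := hc_ahead rest
    ((c == '-') || (c != ',' && t.headD false)) :: t

-- forward pass over zip(data, dash_ahead[1:]) with the dash_behind flag
def hc_forward : List (Char × Bool) → Bool → List Char
  | [], _ => []
  | (c, a) :: rest, dash_behind =>
    if c == ',' then
      (if dash_behind || a then [','] else []) ++ hc_forward rest false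
    else
      c :: hc_forward rest (dash_behind || c == '-')

def hide_commas_alt (data : String) : String :=
  let cs := data.toList
  let dash_ahead := hc_ahead cs
  String.ofList (hc_forward (List.zip cs dash_ahead.tail) false)

-- ===== PRECONDITION & SPEC =====
def Spec_hide_commas (data : String) (out : String) : Prop := out = hide_commas_alt data
instance (data : String) (out : String) : Decidable (Spec_hide_commas data out) := by unfold Spec_hide_commas; infer_instance

-- ===== CLAIM (what is proved, stated in full; the proofs are below) =====
def Claim_equal_hide_commas : Prop := ∀ (data : String), Dom_hide_commas data → Spec_hide_commas data (hide_commas data)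

-- ===== LEMMAS AND PROOFS =====

-- '-' in r, as a plain any
def hasDash (r : List Char) : Bool := r.any (· == '-')

lemma isIn_dash (r : List Char) : PySem.Chars.isIn ['-'] r = hasDash r := by
  rcases h : PySem.Chars.isIn ['-'] r with _ | _
  · rw [PySem.Chars.isIn_eq_false_iff] at h
    simp only [hasDash]
    rw [eq_comm, Bool.eq_false_iff]
    intro hc
    exact h (by simpa [List.singleton_infix_iff] using hc)
  · rw [PySem.Chars.isIn_iff_infix] at h
    simp only [hasDash]
    rw [eq_comm]
    simpa [List.singleton_infix_iff] using h

-- split on ',' as a structural recursion: (first token, remaining tokens)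
def spl : List Char → List Char × List (List Char)
  | [] => ([], [])
  | c :: rest =>
    if c = ',' then ([], (spl rest).1 :: (spl rest).2)
    else (c :: (spl rest).1, (spl rest).2)

lemma splitOn_go_eq : ∀ (fuel : Nat) (l cur : List Char) (acc : List (List Char)),
    l.length < fuel →
    PySem.Chars.splitOn.go [','] fuel l cur acc
      = acc.reverse ++ ((cur.reverse ++ (spl l).1) :: (spl l).2) := by
  intro fuel
  induction fuel with
  | zero => intro l cur acc h; omega
  | succ n ih =>
    intro l cur acc h
    cases l with
    | nil => simp [PySem.Chars.splitOn.go, spl]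
    | cons c rest =>
      rw [PySem.Chars.splitOn.go]
      by_cases hc : c = ','
      · subst hc
        rw [if_pos (by simp [List.isPrefixOf])]
        rw [ih _ _ _ (by simpa using Nat.lt_of_succ_lt_succ h)]
        simp [spl]
      · rw [if_neg (by simp [List.isPrefixOf, Ne.symm hc])]
        rw [ih _ _ _ (by simpa using Nat.lt_of_succ_lt_succ h)]
        simp [spl, hc]

lemma splitOn_eq (cs : List Char) :
    PySem.Chars.splitOn cs [','] = (spl cs).1 :: (spl cs).2 := by
  have := splitOn_go_eq (cs.length + 1) cs [] [] (by omega)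
  simpa [PySem.Chars.splitOn] using this

-- token-level emission: for each later token, a comma iff prev or cur has a dash, then the token
def emit : Bool → List (List Char) → List Char
  | _, [] => []
  | w, r :: rs => (if w || hasDash r then [','] else []) ++ r ++ emit (hasDash r) rs

-- A's fold, once past the first token, is emit
lemma foldA : ∀ (rs : List (List Char)) (out : List Char) (w : Bool),
    (rs.foldl hide_commas_body (out, w, false)).1 = out ++ emit w rs := by
  intro rs
  induction rs with
  | nil => intro out w; simp [emit]
  | cons r rs' ih =>
    intro out w
    simp only [List.foldl_cons, hide_commas_body, isIn_dash, emit]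
    rw [ih]
    rcases hw : w <;> rcases hd : hasDash r <;> simp

-- head of the backward pass = "dash in the first token of the suffix"
lemma ahead_head : ∀ (cs : List Char), (hc_ahead cs).headD false = hasDash (spl cs).1 := by
  intro cs
  induction cs with
  | nil => simp [hc_ahead, spl, hasDash]
  | cons c rest ih =>
    by_cases hc : c = ','
    · subst hc; simp [hc_ahead, spl, hasDash]
    · simp only [hc_ahead, spl, if_neg hc, List.headD_eq_head?_getD] at *
      have h2 : (c != ',') = true := by simpa using hc
      simp [hasDash, ih, h2]

-- proof-side restatement of B's forward pass directly on the characters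
def hcRun : Bool → List Char → List Char
  | _, [] => []
  | b, c :: cs =>
    if c = ',' then
      (if b || (hc_ahead cs).headD false then [','] else []) ++ hcRun false cs
    else
      c :: hcRun (b || (c == '-')) cs

-- B's zip-based forward pass is hcRun
lemma forward_eq_run : ∀ (cs : List Char) (b : Bool),
    hc_forward (List.zip cs (hc_ahead cs).tail) b = hcRun b cs := by
  intro cs
  induction cs with
  | nil => intro b; simp [hc_forward, hcRun]
  | cons c cs' ih =>
    intro b
    have hz : List.zip (c :: cs') (hc_ahead (c :: cs')).tail
        = (c, (hc_ahead cs').headD false) :: List.zip cs' (hc_ahead cs').tail := by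
      cases cs' <;> simp [hc_ahead]
    rw [hz]
    by_cases hc : c = ','
    · subst hc; simp [hc_forward, hcRun, ih]
    · simp [hc_forward, hcRun, hc, ih]

-- the char-level filter equals the token-level emission
lemma run_eq_emit : ∀ (cs : List Char) (b : Bool),
    hcRun b cs = (spl cs).1 ++ emit (b || hasDash (spl cs).1) (spl cs).2 := by
  intro cs
  induction cs with
  | nil => intro b; simp [hcRun, spl, emit]
  | cons c rest ih =>
    intro b
    by_cases hc : c = ','
    · subst hc
      simp only [hcRun, ahead_head, ih, spl]
      simp [emit, hasDash]
    · simp only [hcRun, if_neg hc, ih, spl]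
      simp [hasDash, Bool.or_assoc]

-- ===== VERDICT (by name: the statement is the Claim_ definition above) =====
theorem hide_commas_spec : Claim_equal_hide_commas := by
  intro data _
  unfold Spec_hide_commas hide_commas hide_commas_alt
  dsimp only
  rw [splitOn_eq, forward_eq_run, run_eq_emit]
  simp only [List.foldl_cons]
  have h0 : hide_commas_body ([], false, true) (spl data.toList).1
      = ((spl data.toList).1, hasDash (spl data.toList).1, false) := by
    simp [hide_commas_body, isIn_dash]
  rw [h0, foldA]
  simp
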